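-- pv_equiv track=rewrite | github.com/martinstaebler/adventofcode | 2019/adventofcode_0302.py | vec_to_coords
-- ===== SOURCE A (Python) =====
-- def vec_to_coords(vectors):
--     pos_x = 0
--     pos_y = 0
--     coords = []
--     for tuple in vectors:
--         if tuple[0] == "R":
--             for i in range(0,int(tuple[1])):
--                 pos_x += 1
--                 coords.append([pos_x,pos_y])
--
--         elif tuple[0] == "L":
--             for i in range(0,int(tuple[1])):
--                 pos_x -= 1
--                 coords.append([pos_x,pos_y])
--
--         elif tuple[0] == "U":
--             for i in range(0,int(tuple[1])):
--                 pos_y += 1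
--                 coords.append([pos_x,pos_y])
--
--         elif tuple[0] == "D":
--             for i in range(0,int(tuple[1])):
--                 pos_y -= 1
--                 coords.append([pos_x,pos_y])
--
--     return coords
-- ===== SOURCE B (Python) =====
-- def vec_to_coords(vectors):
--     moves = {"R": (1, 0), "L": (-1, 0), "U": (0, 1), "D": (0, -1)}
--     # stage 1: flatten all segments into one list of unit steps
--     steps = []
--     for d, n in vectors:
--         if d in moves:
--             steps += [moves[d]] * int(n)
--     # stage 2: running (prefix) sum over the unit steps
--     coords = []
--     x = y = 0
--     for dx, dy in steps:
--         x += dx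
--         y += dy
--         coords.append([x, y])
--     return coords
-- ===== Notes on version B (the rewrite author's own statement) =====
-- stated objective: alternative
-- what changed: Replaces A's single fused loop with four copy-pasted direction branches by a two-stage pipeline: stage 1 flattens all (direction, length) segments into one list of unit-step deltas via a dict lookup and list repetition, stage 2 turns that list into coordinates with a running prefix sum.
import Mathlib
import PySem

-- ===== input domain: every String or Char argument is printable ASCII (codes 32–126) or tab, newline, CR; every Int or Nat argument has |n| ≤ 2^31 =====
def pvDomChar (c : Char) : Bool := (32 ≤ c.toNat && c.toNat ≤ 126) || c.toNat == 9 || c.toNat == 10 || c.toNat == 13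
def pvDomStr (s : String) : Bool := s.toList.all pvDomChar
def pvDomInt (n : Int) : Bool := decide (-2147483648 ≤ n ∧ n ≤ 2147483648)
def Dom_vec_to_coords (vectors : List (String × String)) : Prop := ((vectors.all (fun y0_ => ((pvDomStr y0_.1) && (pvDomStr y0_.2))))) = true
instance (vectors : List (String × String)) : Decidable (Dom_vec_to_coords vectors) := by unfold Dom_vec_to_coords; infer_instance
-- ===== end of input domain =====

-- B replaces A's single fused four-branch loop by a two-stage pipeline: first flatten
-- the segments into one list of unit steps, then take a running sum (alternative
-- decomposition; same asymptotic cost).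


-- ===== PORT A =====
-- literal port of A: state (pos_x, pos_y, coords); four branches, each an
-- incremental step-then-append loop over range(0, int(tuple[1])).
def vec_to_coords (vectors : List (String × String)) : List (List Int) :=
  (vectors.foldl (fun (st : Int × Int × List (List Int)) t =>
    if t.1 == "R" then
      (PySem.List.pyRange 0 ((PySem.Int.ofStr? t.2).getD 0) 1).foldl
        (fun s _ => (s.1 + 1, s.2.1, s.2.2 ++ [[s.1 + 1, s.2.1]])) st
    else if t.1 == "L" then
      (PySem.List.pyRange 0 ((PySem.Int.ofStr? t.2).getD 0) 1).foldl
        (fun s _ => (s.1 - 1, s.2.1, s.2.2 ++ [[s.1 - 1, s.2.1]])) st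
    else if t.1 == "U" then
      (PySem.List.pyRange 0 ((PySem.Int.ofStr? t.2).getD 0) 1).foldl
        (fun s _ => (s.1, s.2.1 + 1, s.2.2 ++ [[s.1, s.2.1 + 1]])) st
    else if t.1 == "D" then
      (PySem.List.pyRange 0 ((PySem.Int.ofStr? t.2).getD 0) 1).foldl
        (fun s _ => (s.1, s.2.1 - 1, s.2.2 ++ [[s.1, s.2.1 - 1]])) st
    else st) ((0 : Int), (0 : Int), ([] : List (List Int)))).2.2

-- ===== PORT B =====
def pvMoves : PySem.Dict String (Int × Int) :=
  PySem.Dict.ofList [("R", (1, 0)), ("L", (-1, 0)), ("U", (0, 1)), ("D", (0, -1))]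

-- literal port of B: stage 1 flattens the segments into one list of unit steps
-- ('steps += [moves[d]] * int(n)' is PySem.List.pyRepeat, Python's list-repeat,
-- exact incl. negative counts); stage 2 is a running sum over that list.
def vec_to_coords_alt (vectors : List (String × String)) : List (List Int) :=
  let steps : List (Int × Int) :=
    vectors.foldl (fun acc t =>
      match pvMoves.get? t.1 with
      | some d => acc ++ PySem.List.pyRepeat [d] ((PySem.Int.ofStr? t.2).getD 0)
      | none => acc) []
  (steps.foldl (fun (s : Int × Int × List (List Int)) d =>
    (s.1 + d.1, s.2.1 + d.2, s.2.2 ++ [[s.1 + d.1, s.2.1 + d.2]]))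
    ((0 : Int), (0 : Int), ([] : List (List Int)))).2.2

-- ===== PRECONDITION & SPEC =====
def Pre_vec_to_coords (vectors : List (String × String)) : Prop :=
  ∀ t ∈ vectors, (t.1 = "R" ∨ t.1 = "L" ∨ t.1 = "U" ∨ t.1 = "D") →
    (PySem.Int.ofStr? t.2).isSome
-- Pre_ excludes exactly the inputs on which Python A raises ValueError: a pair whose
-- direction is one of "R"/"L"/"U"/"D" but whose length string is not an int literal
-- (optional sign, digit run, strip-pable surrounding whitespace): lengths like "7",
-- "+5", " 12 " are admitted, a pair like ("R", "x") is excluded; on every other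
-- input Python A returns normally.
instance (vectors : List (String × String)) : Decidable (Pre_vec_to_coords vectors) := by
  unfold Pre_vec_to_coords; infer_instance

def pvWitness_vec_to_coords : (List (String × String)) :=
  [("R", "3"), ("X", "zz"), ("D", "2"), ("U", "-1"), ("L", "2")]

def Spec_vec_to_coords (vectors : List (String × String)) (out : List (List Int)) : Prop := out = vec_to_coords_alt vectors
instance (vectors : List (String × String)) (out : List (List Int)) : Decidable (Spec_vec_to_coords vectors out) := by unfold Spec_vec_to_coords; infer_instance

-- ===== CLAIM =====
def Claim_equal_vec_to_coords : Prop := ∀ (vectors : List (String × String)), Dom_vec_to_coords vectors → Pre_vec_to_coords vectors → Spec_vec_to_coords vectors (vec_to_coords vectors)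

-- ===== LEMMAS AND PROOFS =====

-- the unit steps one segment contributes (B's stage-1 contribution per vector)
def pvSeg (t : String × String) : List (Int × Int) :=
  match pvMoves.get? t.1 with
  | some d => PySem.List.pyRepeat [d] ((PySem.Int.ofStr? t.2).getD 0)
  | none => []

-- B's stage-2 step function
def pvStep (s : Int × Int × List (List Int)) (d : Int × Int) : Int × Int × List (List Int) :=
  (s.1 + d.1, s.2.1 + d.2, s.2.2 ++ [[s.1 + d.1, s.2.1 + d.2]])

-- a fold whose function ignores its element equals the pvStep-fold over a
-- same-length constant list
theorem pvLoopEq (d : Int × Int) (f : Int × Int × List (List Int) → Int → Int × Int × List (List Int))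
    (hf : ∀ s a, f s a = pvStep s d) :
    ∀ (l : List Int) (s), l.foldl f s = (List.replicate l.length d).foldl pvStep s := by
  intro l
  induction l with
  | nil => intro s; simp
  | cons a l ih => intro s; simp only [List.foldl_cons, List.length_cons,
      List.replicate_succ, hf]; exact ih _

-- A's inner loop for a recognized direction equals B's step-fold over that segment
theorem pvBranchEq (t : String × String) (d : Int × Int) (hd : pvMoves.get? t.1 = some d)
    (f : Int × Int × List (List Int) → Int → Int × Int × List (List Int))
    (hf : ∀ s a, f s a = pvStep s d) (s : Int × Int × List (List Int)) :
    (PySem.List.pyRange 0 ((PySem.Int.ofStr? t.2).getD 0) 1).foldl f s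
      = (pvSeg t).foldl pvStep s := by
  rw [pvLoopEq d f hf]
  unfold pvSeg
  rw [hd]
  simp only [PySem.List.pyRepeat_singleton]
  congr 2
  rw [PySem.List.length_pyRange_one]
  omega

-- A's whole fold, from any state, equals the pvStep-fold over the flattened steps
theorem pvMain : ∀ (vectors : List (String × String)) (s : Int × Int × List (List Int)),
    vectors.foldl (fun (st : Int × Int × List (List Int)) t =>
      if t.1 == "R" then
        (PySem.List.pyRange 0 ((PySem.Int.ofStr? t.2).getD 0) 1).foldl
          (fun s _ => (s.1 + 1, s.2.1, s.2.2 ++ [[s.1 + 1, s.2.1]])) st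
      else if t.1 == "L" then
        (PySem.List.pyRange 0 ((PySem.Int.ofStr? t.2).getD 0) 1).foldl
          (fun s _ => (s.1 - 1, s.2.1, s.2.2 ++ [[s.1 - 1, s.2.1]])) st
      else if t.1 == "U" then
        (PySem.List.pyRange 0 ((PySem.Int.ofStr? t.2).getD 0) 1).foldl
          (fun s _ => (s.1, s.2.1 + 1, s.2.2 ++ [[s.1, s.2.1 + 1]])) st
      else if t.1 == "D" then
        (PySem.List.pyRange 0 ((PySem.Int.ofStr? t.2).getD 0) 1).foldl
          (fun s _ => (s.1, s.2.1 - 1, s.2.2 ++ [[s.1, s.2.1 - 1]])) st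
      else st) s
    = (vectors.flatMap pvSeg).foldl pvStep s := by
  intro vectors
  induction vectors with
  | nil => intro s; simp
  | cons t vectors ih =>
    intro s
    rw [List.flatMap_cons, List.foldl_append, List.foldl_cons, ih]
    congr 1
    by_cases hR : t.1 = "R"
    · simp only [hR, beq_self_eq_true, if_true]
      exact pvBranchEq t (1, 0) (by rw [hR]; decide) _
        (fun s a => by simp [pvStep]) s
    · by_cases hL : t.1 = "L"
      · simp only [hL, show ("L" == "R") = false by decide, Bool.false_eq_true,
          if_false, beq_self_eq_true, if_true]
        exact pvBranchEq t (-1, 0) (by rw [hL]; decide) _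
          (fun s a => by simp [pvStep, sub_eq_add_neg]) s
      · by_cases hU : t.1 = "U"
        · simp only [hU, show ("U" == "R") = false by decide,
            show ("U" == "L") = false by decide, Bool.false_eq_true, if_false,
            beq_self_eq_true, if_true]
          exact pvBranchEq t (0, 1) (by rw [hU]; decide) _
            (fun s a => by simp [pvStep]) s
        · by_cases hD : t.1 = "D"
          · simp only [hD, show ("D" == "R") = false by decide,
              show ("D" == "L") = false by decide, show ("D" == "U") = false by decide,
              Bool.false_eq_true, if_false, beq_self_eq_true, if_true]
            exact pvBranchEq t (0, -1) (by rw [hD]; decide) _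
              (fun s a => by simp [pvStep, sub_eq_add_neg]) s
          · have h1 : (t.1 == "R") = false := by simpa using hR
            have h2 : (t.1 == "L") = false := by simpa using hL
            have h3 : (t.1 == "U") = false := by simpa using hU
            have h4 : (t.1 == "D") = false := by simpa using hD
            have h5 : pvMoves.get? t.1 = none := by
              rw [PySem.Dict.get?_eq_none_iff_not_mem_keys]
              have hk : pvMoves.keys = ["R", "L", "U", "D"] := by decide
              rw [hk]; simp [hR, hL, hU, hD]
            simp [h1, h2, h3, h4, pvSeg, h5]

-- B's stage 1 builds exactly the flattened segment list
theorem pvStepsEq (vectors : List (String × String)) :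
    vectors.foldl (fun acc t =>
      match pvMoves.get? t.1 with
      | some d => acc ++ PySem.List.pyRepeat [d] ((PySem.Int.ofStr? t.2).getD 0)
      | none => acc) []
    = vectors.flatMap pvSeg := by
  have h : ∀ (acc : List (Int × Int)) (t : String × String),
      (match pvMoves.get? t.1 with
       | some d => acc ++ PySem.List.pyRepeat [d] ((PySem.Int.ofStr? t.2).getD 0)
       | none => acc) = acc ++ pvSeg t := by
    intro acc t
    unfold pvSeg
    cases pvMoves.get? t.1 <;> simp
  calc vectors.foldl (fun acc t =>
        match pvMoves.get? t.1 with
        | some d => acc ++ PySem.List.pyRepeat [d] ((PySem.Int.ofStr? t.2).getD 0)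
        | none => acc) []
      = vectors.foldl (fun acc t => acc ++ pvSeg t) [] := by
        exact PySem.List.foldl_congr_mem _ _ _ _ (fun acc t _ => h acc t)
    _ = [] ++ vectors.flatMap pvSeg := PySem.List.foldl_append_eq_flatMap _ _ _
    _ = vectors.flatMap pvSeg := by simp

-- ===== VERDICT =====
theorem vec_to_coords_spec : Claim_equal_vec_to_coords := by
  intro vectors _ _
  unfold Spec_vec_to_coords vec_to_coords vec_to_coords_alt
  rw [pvMain, pvStepsEq]
  rfl
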